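-- pv_equiv track=rewrite | github.com/wyk18703232953/myResearch | codeComplex/data/filteredData/python/constant/python_constant_0091.py | k_neighborhood_sum
-- ===== SOURCE A (Python) =====
-- def k_neighborhood_sum(mat, k: int):
--     # 来自原始矩阵区域和逻辑，计算每个点周围 k-邻域的和
--     if not mat or not mat[0]:
--         return []
--
--     rows = len(mat)
--     cols = len(mat[0])
--     temp = [[0 for _ in range(cols)] for _ in range(rows)]
--
--     # 横向前缀和
--     for i in range(rows):
--         temp[i][0] = mat[i][0]
--         for j in range(1, cols):
--             temp[i][j] = temp[i][j - 1] + mat[i][j]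
--
--     # 纵向前缀和（转为二维前缀和）
--     for i in range(1, rows):
--         for j in range(cols):
--             temp[i][j] = temp[i - 1][j] + temp[i][j]
--
--     ans = [[0 for _ in range(cols)] for _ in range(rows)]
--     for i in range(rows):
--         for j in range(cols):
--             area1 = 0
--             area2 = 0
--             area3 = 0
--
--             if i - k >= 0:
--                 lr = i - k
--             else:
--                 lr = 0
--             if j - k >= 0:
--                 lc = j - k
--             else:
--                 lc = 0
--
--             if i + k < rows:
--                 rr = i + k
--             else:
--                 rr = rows - 1
--             if j + k < cols:
--                 rc = j + k
--             else:
--                 rc = cols - 1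
--
--             if lc - 1 >= 0:
--                 area1 = temp[rr][lc - 1]
--             if lr - 1 >= 0:
--                 area2 = temp[lr - 1][rc]
--             if lr - 1 >= 0 and lc - 1 >= 0:
--                 area3 = temp[lr - 1][lc - 1]
--
--             ans[i][j] = temp[rr][rc] - area1 - area2 + area3
--
--     return ans
-- ===== SOURCE B (Python) =====
-- def k_neighborhood_sum(mat, k: int):
--     # Direct clamped-window summation per cell; no prefix-sum table.
--     if not mat or not mat[0]:
--         return []
--     rows, cols = len(mat), len(mat[0])
--
--     def window(i, j):
--         lr, rr = max(i - k, 0), min(i + k, rows - 1)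
--         lc, rc = max(j - k, 0), min(j + k, cols - 1)
--         return sum(mat[r][c] for r in range(lr, rr + 1) for c in range(lc, rc + 1))
--
--     return [[window(i, j) for j in range(cols)] for i in range(rows)]
-- ===== Notes on version B (the rewrite author's own statement) =====
-- stated objective: simpler
-- what changed: Replaces the 2D prefix-sum table and four-corner inclusion-exclusion by directly summing the clamped k-window around each cell.
-- outside the precondition, e.g. on k_neighborhood_sum([[1, 2], [3, 4]], -1): A returns [[4, -4], [-4, 4]], B returns [[0, 0], [0, 0]]
import Mathlib
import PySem

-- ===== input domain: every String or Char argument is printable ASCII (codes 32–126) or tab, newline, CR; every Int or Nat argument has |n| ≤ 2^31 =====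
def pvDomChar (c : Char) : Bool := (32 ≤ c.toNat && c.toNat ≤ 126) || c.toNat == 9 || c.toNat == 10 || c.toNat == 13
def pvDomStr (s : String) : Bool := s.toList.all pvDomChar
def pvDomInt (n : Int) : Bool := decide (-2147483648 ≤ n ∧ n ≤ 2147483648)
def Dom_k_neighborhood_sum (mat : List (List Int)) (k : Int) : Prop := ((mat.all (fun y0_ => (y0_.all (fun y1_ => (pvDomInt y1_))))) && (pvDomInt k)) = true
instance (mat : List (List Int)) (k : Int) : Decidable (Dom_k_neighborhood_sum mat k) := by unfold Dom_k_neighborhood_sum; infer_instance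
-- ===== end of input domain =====

-- B replaces A's 2D prefix-sum table and four-corner inclusion-exclusion by directly
-- summing the clamped k-window around each cell (objective: simpler).

-- ===== PORT A =====
-- mat[i][j] read (indices are in range on every input Pre_ admits)
def pvGet2 (m : List (List Int)) (i j : Nat) : Int := (m.getD i []).getD j 0
-- m[i][j] = v  (in-range on every input Pre_ admits)
def pvSet2 (m : List (List Int)) (i j : Nat) (v : Int) : List (List Int) :=
  m.set i ((m.getD i []).set j v)

def k_neighborhood_sum (mat : List (List Int)) (k : Int) : List (List Int) :=
  if mat = [] ∨ mat.getD 0 [] = [] then [] else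
  let rows := mat.length
  let cols := (mat.getD 0 []).length
  let temp0 : List (List Int) := List.replicate rows (List.replicate cols 0)
  -- 横向前缀和
  let temp1 := (List.range rows).foldl (fun t i =>
      let t := pvSet2 t i 0 (pvGet2 mat i 0)
      (List.range' 1 (cols - 1)).foldl
        (fun t j => pvSet2 t i j (pvGet2 t i (j - 1) + pvGet2 mat i j)) t) temp0
  -- 纵向前缀和
  let temp2 := (List.range' 1 (rows - 1)).foldl (fun t i =>
      (List.range cols).foldl
        (fun t j => pvSet2 t i j (pvGet2 t (i - 1) j + pvGet2 t i j)) t) temp1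
  let ans0 : List (List Int) := List.replicate rows (List.replicate cols 0)
  (List.range rows).foldl (fun a (i : Nat) =>
    (List.range cols).foldl (fun a (j : Nat) =>
      let lr : Int := if (i : Int) - k ≥ 0 then (i : Int) - k else 0
      let lc : Int := if (j : Int) - k ≥ 0 then (j : Int) - k else 0
      let rr : Int := if (i : Int) + k < (rows : Int) then (i : Int) + k else (rows : Int) - 1
      let rc : Int := if (j : Int) + k < (cols : Int) then (j : Int) + k else (cols : Int) - 1
      let area1 : Int := if lc - 1 ≥ 0 then pvGet2 temp2 rr.toNat (lc - 1).toNat else 0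
      let area2 : Int := if lr - 1 ≥ 0 then pvGet2 temp2 (lr - 1).toNat rc.toNat else 0
      let area3 : Int := if lr - 1 ≥ 0 ∧ lc - 1 ≥ 0 then pvGet2 temp2 (lr - 1).toNat (lc - 1).toNat else 0
      pvSet2 a i j (pvGet2 temp2 rr.toNat rc.toNat - area1 - area2 + area3)) a) ans0

-- ===== PORT B =====
def k_neighborhood_sum_alt (mat : List (List Int)) (k : Int) : List (List Int) :=
  if mat = [] ∨ mat.getD 0 [] = [] then [] else
  let rows := mat.length
  let cols := (mat.getD 0 []).length
  (List.range rows).map (fun (i : Nat) =>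
    (List.range cols).map (fun (j : Nat) =>
      let lr : Int := max ((i : Int) - k) 0
      let rr : Int := min ((i : Int) + k) ((rows : Int) - 1)
      let lc : Int := max ((j : Int) - k) 0
      let rc : Int := min ((j : Int) + k) ((cols : Int) - 1)
      (PySem.List.pyRange lr (rr + 1) 1).foldl (fun s r =>
        (PySem.List.pyRange lc (rc + 1) 1).foldl (fun s c =>
          s + (mat.getD r.toNat []).getD c.toNat 0) s) 0))

-- ===== PRECONDITION & SPEC =====
-- Pre_ excludes (beyond the trivial empty-matrix cases) negative k, on which A reads the
-- prefix table at Python negative indices and returns wraparound artefacts (or raises),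
-- and ragged matrices with some row shorter than the first, on which A raises IndexError.
def Pre_k_neighborhood_sum (mat : List (List Int)) (k : Int) : Prop :=
  (mat = [] ∨ mat.getD 0 [] = []) ∨
  (0 ≤ k ∧ ∀ row ∈ mat, (mat.getD 0 []).length ≤ row.length)
instance (mat : List (List Int)) (k : Int) : Decidable (Pre_k_neighborhood_sum mat k) := by
  unfold Pre_k_neighborhood_sum; infer_instance

def pvWitness_k_neighborhood_sum : List (List Int) × Int := ([[1, 2], [3, 4]], 1)

def Spec_k_neighborhood_sum (mat : List (List Int)) (k : Int) (out : List (List Int)) : Prop := out = k_neighborhood_sum_alt mat k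
instance (mat : List (List Int)) (k : Int) (out : List (List Int)) : Decidable (Spec_k_neighborhood_sum mat k out) := by unfold Spec_k_neighborhood_sum; infer_instance

-- ===== CLAIM (what is proved, stated in full; the proofs are below) =====
def Claim_equal_k_neighborhood_sum : Prop := ∀ (mat : List (List Int)) (k : Int), Dom_k_neighborhood_sum mat k → Pre_k_neighborhood_sum mat k → Spec_k_neighborhood_sum mat k (k_neighborhood_sum mat k)

-- ===== LEMMAS AND PROOFS =====

-- getD facts used throughout
lemma pv_getD_set_self (l : List (List Int)) (i : Nat) (x : List Int) (h : i < l.length) :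
    (l.set i x).getD i [] = x := by
  simp [List.getD, h]

lemma pv_getD_set_ne (l : List (List Int)) (i p : Nat) (x : List Int) (h : p ≠ i) :
    (l.set i x).getD p [] = l.getD p [] := by
  simp [List.getD, List.getElem?_set_ne (by omega : i ≠ p)]

lemma pv_set_getD_self (l : List (List Int)) (i : Nat) (h : i < l.length) :
    l.set i (l.getD i []) = l := by
  apply List.ext_getElem (by simp)
  intro n h1 h2
  rw [List.getElem_set]
  simp only [List.getD, List.getElem?_eq_getElem h]
  split <;> simp_all

-- sum over a mapped range as a Finset sum
lemma pv_sum_map_range (n : Nat) (f : Nat → Int) :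
    ((List.range n).map f).sum = ∑ t ∈ Finset.range n, f t := by
  induction n with
  | zero => simp
  | succ m ih => rw [List.range_succ, Finset.sum_range_succ]; simp [ih]

-- an in-place update of a row-list in map-over-range form
lemma pv_set_map_range (n i : Nat) (f : Nat → Int) (x : Int) (_hi : i < n) :
    ((List.range n).map f).set i x = (List.range n).map (fun r => if r = i then x else f r) := by
  apply List.ext_getElem (by simp)
  intro m h1 h2
  simp only [List.getElem_set, List.getElem_map, List.getElem_range]
  simp only [List.length_set, List.length_map, List.length_range] at h1
  by_cases hmi : i = m
  · subst hmi; simp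
  · simp only [if_neg hmi, if_neg (fun h : m = i => hmi h.symm)]

lemma pv_set_map_range2 (n i : Nat) (f : Nat → List Int) (x : List Int) (_hi : i < n) :
    ((List.range n).map f).set i x = (List.range n).map (fun r => if r = i then x else f r) := by
  apply List.ext_getElem (by simp)
  intro m h1 h2
  simp only [List.getElem_set, List.getElem_map, List.getElem_range]
  by_cases hmi : i = m
  · subst hmi; simp
  · simp only [if_neg hmi, if_neg (fun h : m = i => hmi h.symm)]

-- a fold whose step only rewrites row i equals a set of row i to the folded row
lemma pv_foldl_rowlocal (l : List Nat) (f : List Int → Nat → List Int) :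
    ∀ (t : List (List Int)) (i : Nat), i < t.length →
      l.foldl (fun t j => t.set i (f (t.getD i []) j)) t = t.set i (l.foldl f (t.getD i [])) := by
  induction l with
  | nil => intro t i hi; simp only [List.foldl_nil]; exact (pv_set_getD_self t i hi).symm
  | cons j rest ih =>
      intro t i hi
      simp only [List.foldl_cons]
      rw [ih _ i (by simpa using hi), List.set_set, pv_getD_set_self t i _ hi]

-- same, when the step also reads a fixed other row p ≠ i
lemma pv_foldl_rowlocal2 (l : List Nat) (f : List Int → List Int → Nat → List Int) :
    ∀ (t : List (List Int)) (i p : Nat), i < t.length → p ≠ i →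
      l.foldl (fun t j => t.set i (f (t.getD p []) (t.getD i []) j)) t
        = t.set i (l.foldl (f (t.getD p [])) (t.getD i [])) := by
  induction l with
  | nil => intro t i p hi hp; simp only [List.foldl_nil]; exact (pv_set_getD_self t i hi).symm
  | cons j rest ih =>
      intro t i p hi hp
      simp only [List.foldl_cons]
      rw [ih _ i p (by simpa using hi) hp, List.set_set,
        pv_getD_set_self t i _ hi, pv_getD_set_ne t i p _ hp]

-- inclusive horizontal and 2D prefix sums of the matrix (what A's temp table holds)
def pvRowP (mat : List (List Int)) (i Y : Nat) : Int := ∑ c ∈ Finset.range Y, pvGet2 mat i c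

def pvP (mat : List (List Int)) (X Y : Nat) : Int := ∑ r ∈ Finset.range X, pvRowP mat r Y

-- the outer loops of A write each row once, left to right
lemma pv_fold_fresh (step : List (List Int) → Nat → List (List Int)) (F : Nat → List Int → List Int)
    (r0 : List Int) (rows : Nat)
    (hstep : ∀ t i, i < t.length → step t i = t.set i (F i (t.getD i []))) :
    ∀ n, n ≤ rows → (List.range n).foldl step ((List.range rows).map (fun _ => r0))
      = (List.range rows).map (fun i => if i < n then F i r0 else r0) := by
  intro n
  induction n with
  | zero => intro _; simp
  | succ m ih =>
      intro hm
      rw [List.range_succ, List.foldl_append, List.foldl_cons, List.foldl_nil, ih (by omega),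
        hstep _ m (by simp; omega), PySem.List.getD_map_range _ rows m [] (by omega)]
      simp only [if_neg (by omega : ¬ m < m)]
      rw [pv_set_map_range2 rows m _ _ (by omega)]
      apply List.map_congr_left
      intro r hr
      by_cases h1 : r = m
      · simp [h1]
      · by_cases h2 : r < m <;> simp [h1, (by omega : r < m + 1 ↔ r < m ∨ r = m), h2]

-- one left-to-right in-place pass over a row, each cell written from its old value
lemma pv_fill (w : Nat → Int → Int) (u : Nat → Int) (cols : Nat) :
    ∀ n, n ≤ cols → (List.range n).foldl (fun row j => row.set j (w j (row.getD j 0)))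
        ((List.range cols).map u)
      = (List.range cols).map (fun j => if j < n then w j (u j) else u j) := by
  intro n
  induction n with
  | zero => intro _; simp
  | succ m ih =>
      intro hm
      rw [List.range_succ, List.foldl_append, List.foldl_cons, List.foldl_nil, ih (by omega),
        PySem.List.getD_map_range _ cols m 0 (by omega)]
      simp only [if_neg (by omega : ¬ m < m)]
      rw [pv_set_map_range cols m _ _ (by omega)]
      apply List.map_congr_left
      intro c hc
      by_cases h1 : c = m
      · simp [h1]
      · by_cases h2 : c < m <;> simp [h1, (by omega : c < m + 1 ↔ c < m ∨ c = m), h2]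

-- A's horizontal prefix pass over one row, cell j written from cell j-1
lemma pv_fillH (g : Nat → Int) (H : Nat → Int) (cols : Nat)
    (hrec : ∀ j, H (j + 1) = H j + g (j + 1)) (hcols : 0 < cols) :
    ∀ n, n + 1 ≤ cols →
      (List.range' 1 n).foldl (fun row j => row.set j (row.getD (j - 1) 0 + g j))
          (((List.range cols).map (fun _ => (0 : Int))).set 0 (H 0))
        = (List.range cols).map (fun j => if j ≤ n then H j else 0) := by
  intro n
  induction n with
  | zero =>
      intro _
      rw [pv_set_map_range cols 0 _ _ hcols]
      apply List.map_congr_left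
      intro c _
      by_cases h1 : c = 0 <;> simp [h1]
  | succ m ih =>
      intro hm
      rw [List.range'_1_concat, List.foldl_append, List.foldl_cons, List.foldl_nil, ih (by omega),
        PySem.List.getD_map_range _ cols (1 + m - 1) 0 (by omega)]
      simp only [if_pos (by omega : 1 + m - 1 ≤ m)]
      rw [pv_set_map_range cols (1 + m) _ _ (by omega)]
      have hHm : 1 + m - 1 = m := by omega
      have h1m : 1 + m = m + 1 := by omega
      apply List.map_congr_left
      intro c _
      by_cases h1 : c = 1 + m
      · subst h1
        rw [if_pos rfl, if_pos (by omega : 1 + m ≤ m + 1), hHm, h1m, hrec m]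
      · simp only [if_neg h1]
        by_cases h2 : c ≤ m
        · rw [if_pos h2, if_pos (by omega : c ≤ m + 1)]
        · rw [if_neg h2, if_neg (by omega : ¬ c ≤ m + 1)]

-- A's vertical pass: row i is rewritten once from row i-1, for i = 1 .. rows-1
lemma pv_fold_chain (step : List (List Int) → Nat → List (List Int))
    (G : Nat → List Int → List Int → List Int) (R S : Nat → List Int) (rows : Nat)
    (hstep : ∀ t i, i < t.length → 1 ≤ i → step t i = t.set i (G i (t.getD (i - 1) []) (t.getD i [])))
    (hS0 : S 0 = R 0) (hSrec : ∀ i, S (i + 1) = G (i + 1) (S i) (R (i + 1))) :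
    ∀ n, n + 1 ≤ rows →
      (List.range' 1 n).foldl step ((List.range rows).map R)
        = (List.range rows).map (fun r => if r ≤ n then S r else R r) := by
  intro n
  induction n with
  | zero =>
      intro _
      apply List.map_congr_left
      intro r _
      by_cases h1 : r = 0 <;> simp [h1, hS0]
  | succ m ih =>
      intro hm
      rw [List.range'_1_concat, List.foldl_append, List.foldl_cons, List.foldl_nil, ih (by omega),
        hstep _ (1 + m) (by simp; omega) (by omega)]
      rw [PySem.List.getD_map_range _ rows (1 + m - 1) [] (by omega),
        PySem.List.getD_map_range _ rows (1 + m) [] (by omega)]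
      simp only [if_pos (by omega : 1 + m - 1 ≤ m), if_neg (by omega : ¬ 1 + m ≤ m)]
      rw [pv_set_map_range2 rows (1 + m) _ _ (by omega)]
      have hHm : 1 + m - 1 = m := by omega
      have h1m : 1 + m = m + 1 := by omega
      apply List.map_congr_left
      intro r _
      by_cases h1 : r = 1 + m
      · subst h1
        rw [if_pos rfl, if_pos (by omega : 1 + m ≤ m + 1), hHm, h1m, hSrec m]
      · simp only [if_neg h1]
        by_cases h2 : r ≤ m
        · rw [if_pos h2, if_pos (by omega : r ≤ m + 1)]
        · rw [if_neg h2, if_neg (by omega : ¬ r ≤ m + 1)]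

def pvV (mat : List (List Int)) (i j : Nat) : Int := pvP mat (i + 1) (j + 1)

-- the value A stores in ans[i][j], with temp-table reads replaced by prefix sums
def pvAcell (mat : List (List Int)) (k : Int) (i j : Nat) : Int :=
  let rows := mat.length
  let cols := (mat.getD 0 []).length
  let lr : Int := if (i : Int) - k ≥ 0 then (i : Int) - k else 0
  let lc : Int := if (j : Int) - k ≥ 0 then (j : Int) - k else 0
  let rr : Int := if (i : Int) + k < (rows : Int) then (i : Int) + k else (rows : Int) - 1
  let rc : Int := if (j : Int) + k < (cols : Int) then (j : Int) + k else (cols : Int) - 1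
  pvV mat rr.toNat rc.toNat
    - (if lc - 1 ≥ 0 then pvV mat rr.toNat (lc - 1).toNat else 0)
    - (if lr - 1 ≥ 0 then pvV mat (lr - 1).toNat rc.toNat else 0)
    + (if lr - 1 ≥ 0 ∧ lc - 1 ≥ 0 then pvV mat (lr - 1).toNat (lc - 1).toNat else 0)


-- the raw expression A's answer loop stores, reading the prefix table in map form
def pvCellRead (mat : List (List Int)) (k : Int) (i j : Nat) : Int :=
  ((List.map (fun i => List.map (fun j => pvV mat i j) (List.range (mat.getD 0 []).length)) (List.range mat.length)).getD (if (i : Int) + k < (mat.length : Int) then (i : Int) + k else (mat.length : Int) - 1).toNat []).getD (if (j : Int) + k < ((mat.getD 0 []).length : Int) then (j : Int) + k else ((mat.getD 0 []).length : Int) - 1).toNat 0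
  - (if (if (j : Int) - k ≥ 0 then (j : Int) - k else 0) - 1 ≥ 0 then ((List.map (fun i => List.map (fun j => pvV mat i j) (List.range (mat.getD 0 []).length)) (List.range mat.length)).getD (if (i : Int) + k < (mat.length : Int) then (i : Int) + k else (mat.length : Int) - 1).toNat []).getD ((if (j : Int) - k ≥ 0 then (j : Int) - k else 0) - 1).toNat 0 else 0)
  - (if (if (i : Int) - k ≥ 0 then (i : Int) - k else 0) - 1 ≥ 0 then ((List.map (fun i => List.map (fun j => pvV mat i j) (List.range (mat.getD 0 []).length)) (List.range mat.length)).getD ((if (i : Int) - k ≥ 0 then (i : Int) - k else 0) - 1).toNat []).getD (if (j : Int) + k < ((mat.getD 0 []).length : Int) then (j : Int) + k else ((mat.getD 0 []).length : Int) - 1).toNat 0 else 0)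
  + (if (if (i : Int) - k ≥ 0 then (i : Int) - k else 0) - 1 ≥ 0 ∧ (if (j : Int) - k ≥ 0 then (j : Int) - k else 0) - 1 ≥ 0 then ((List.map (fun i => List.map (fun j => pvV mat i j) (List.range (mat.getD 0 []).length)) (List.range mat.length)).getD ((if (i : Int) - k ≥ 0 then (i : Int) - k else 0) - 1).toNat []).getD ((if (j : Int) - k ≥ 0 then (j : Int) - k else 0) - 1).toNat 0 else 0)

lemma pv_cellRead_def (mat : List (List Int)) (k : Int) (i j : Nat) :
  ((List.map (fun i => List.map (fun j => pvV mat i j) (List.range (mat.getD 0 []).length)) (List.range mat.length)).getD (if (i : Int) + k < (mat.length : Int) then (i : Int) + k else (mat.length : Int) - 1).toNat []).getD (if (j : Int) + k < ((mat.getD 0 []).length : Int) then (j : Int) + k else ((mat.getD 0 []).length : Int) - 1).toNat 0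
  - (if (if (j : Int) - k ≥ 0 then (j : Int) - k else 0) - 1 ≥ 0 then ((List.map (fun i => List.map (fun j => pvV mat i j) (List.range (mat.getD 0 []).length)) (List.range mat.length)).getD (if (i : Int) + k < (mat.length : Int) then (i : Int) + k else (mat.length : Int) - 1).toNat []).getD ((if (j : Int) - k ≥ 0 then (j : Int) - k else 0) - 1).toNat 0 else 0)
  - (if (if (i : Int) - k ≥ 0 then (i : Int) - k else 0) - 1 ≥ 0 then ((List.map (fun i => List.map (fun j => pvV mat i j) (List.range (mat.getD 0 []).length)) (List.range mat.length)).getD ((if (i : Int) - k ≥ 0 then (i : Int) - k else 0) - 1).toNat []).getD (if (j : Int) + k < ((mat.getD 0 []).length : Int) then (j : Int) + k else ((mat.getD 0 []).length : Int) - 1).toNat 0 else 0)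
  + (if (if (i : Int) - k ≥ 0 then (i : Int) - k else 0) - 1 ≥ 0 ∧ (if (j : Int) - k ≥ 0 then (j : Int) - k else 0) - 1 ≥ 0 then ((List.map (fun i => List.map (fun j => pvV mat i j) (List.range (mat.getD 0 []).length)) (List.range mat.length)).getD ((if (i : Int) - k ≥ 0 then (i : Int) - k else 0) - 1).toNat []).getD ((if (j : Int) - k ≥ 0 then (j : Int) - k else 0) - 1).toNat 0 else 0)
  = pvCellRead mat k i j := rfl

lemma pv_cellRead_eq_Acell (mat : List (List Int)) (k : Int) (i j : Nat)
    (hi : i < mat.length) (hj : j < (mat.getD 0 []).length) (hk : 0 ≤ k)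
    (hrows : 0 < mat.length) (hcols : 0 < (mat.getD 0 []).length) :
    pvCellRead mat k i j = pvAcell mat k i j := by
  have hread : ∀ r c : Nat, r < mat.length → c < (mat.getD 0 []).length →
      ((List.map (fun i => List.map (fun j => pvV mat i j) (List.range (mat.getD 0 []).length))
        (List.range mat.length)).getD r []).getD c 0 = pvV mat r c := by
    intro r c hr hc
    rw [PySem.List.getD_map_range _ _ _ _ hr, PySem.List.getD_map_range _ _ _ _ hc]
  have hRR : (if (i : Int) + k < (mat.length : Int) then (i : Int) + k
      else (mat.length : Int) - 1).toNat < mat.length := by split_ifs <;> omega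
  have hRC : (if (j : Int) + k < ((mat.getD 0 []).length : Int) then (j : Int) + k
      else ((mat.getD 0 []).length : Int) - 1).toNat < (mat.getD 0 []).length := by
    split_ifs <;> omega
  have hLR1 : ((if (i : Int) - k ≥ 0 then (i : Int) - k else 0) - 1).toNat < mat.length := by
    split_ifs <;> omega
  have hLC1 : ((if (j : Int) - k ≥ 0 then (j : Int) - k else 0) - 1).toNat
      < (mat.getD 0 []).length := by split_ifs <;> omega
  simp only [pvCellRead, pvAcell]
  rw [hread _ _ hRR hRC, hread _ _ hRR hLC1, hread _ _ hLR1 hRC, hread _ _ hLR1 hLC1]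

lemma pv_A_char (mat : List (List Int)) (k : Int)
    (hg1 : ¬ mat = []) (hg2 : ¬ mat.getD 0 [] = []) (hk : 0 ≤ k) :
    k_neighborhood_sum mat k
      = (List.range mat.length).map (fun i =>
          (List.range (mat.getD 0 []).length).map (fun j => pvAcell mat k i j)) := by
  have hrows : 0 < mat.length := List.length_pos_iff.mpr hg1
  have hcols : 0 < (mat.getD 0 []).length := List.length_pos_iff.mpr hg2
  unfold k_neighborhood_sum
  rw [if_neg (by tauto)]
  simp only [pvSet2, pvGet2]
  have htemp0 : List.replicate mat.length (List.replicate (mat.getD 0 []).length (0:Int))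
      = (List.range mat.length).map (fun _ => List.replicate (mat.getD 0 []).length (0:Int)) := by
    rw [List.map_const']; rw [List.length_range]
  have hH0 : ∀ i : Nat, pvRowP mat i 1 = (mat.getD i []).getD 0 0 := by
    intro i; simp [pvRowP, pvGet2]
  have htemp1 :
      List.foldl (fun t i => List.foldl
          (fun t j => t.set i ((t.getD i []).set j
            ((t.getD i []).getD (j - 1) 0 + (mat.getD i []).getD j 0)))
          (t.set i ((t.getD i []).set 0 ((mat.getD i []).getD 0 0)))
          (List.range' 1 ((mat.getD 0 []).length - 1)))
        (List.replicate mat.length (List.replicate (mat.getD 0 []).length 0))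
        (List.range mat.length)
      = (List.range mat.length).map (fun i =>
          (List.range (mat.getD 0 []).length).map (fun j => pvRowP mat i (j + 1))) := by
    rw [htemp0]
    rw [pv_fold_fresh _
      (fun i row => List.foldl
        (fun row j => row.set j (row.getD (j - 1) 0 + (mat.getD i []).getD j 0))
        (row.set 0 ((mat.getD i []).getD 0 0))
        (List.range' 1 ((mat.getD 0 []).length - 1)))
      (List.replicate (mat.getD 0 []).length 0) mat.length
      (by
        intro t i hi
        rw [pv_foldl_rowlocal (List.range' 1 ((mat.getD 0 []).length - 1))
          (fun row j => row.set j (row.getD (j - 1) 0 + (mat.getD i []).getD j 0))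
          (t.set i ((t.getD i []).set 0 ((mat.getD i []).getD 0 0))) i (by simpa using hi)]
        rw [List.set_set, pv_getD_set_self t i _ hi])
      mat.length le_rfl]
    apply List.map_congr_left
    intro i hi
    rw [if_pos (List.mem_range.mp hi)]
    have hrepl : List.replicate (mat.getD 0 []).length (0:Int)
        = (List.range (mat.getD 0 []).length).map (fun _ => (0:Int)) := by
      rw [List.map_const']; rw [List.length_range]
    rw [hrepl, ← hH0 i]
    rw [pv_fillH (fun j => (mat.getD i []).getD j 0) (fun j => pvRowP mat i (j + 1))
      (mat.getD 0 []).length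
      (by intro j; simp [pvRowP, pvGet2, Finset.sum_range_succ])
      hcols ((mat.getD 0 []).length - 1) (by omega)]
    apply List.map_congr_left
    intro j hj
    rw [if_pos (by have := List.mem_range.mp hj; omega)]
  have htemp2 :
      List.foldl (fun t i => List.foldl
          (fun t j => t.set i ((t.getD i []).set j
            ((t.getD (i - 1) []).getD j 0 + (t.getD i []).getD j 0)))
          t (List.range (mat.getD 0 []).length))
        (List.foldl (fun t i => List.foldl
            (fun t j => t.set i ((t.getD i []).set j
              ((t.getD i []).getD (j - 1) 0 + (mat.getD i []).getD j 0)))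
            (t.set i ((t.getD i []).set 0 ((mat.getD i []).getD 0 0)))
            (List.range' 1 ((mat.getD 0 []).length - 1)))
          (List.replicate mat.length (List.replicate (mat.getD 0 []).length 0))
          (List.range mat.length))
        (List.range' 1 (mat.length - 1))
      = (List.range mat.length).map (fun i =>
          (List.range (mat.getD 0 []).length).map (fun j => pvV mat i j)) := by
    rw [htemp1]
    rw [pv_fold_chain _
      (fun i prev cur => List.foldl (fun row j => row.set j (prev.getD j 0 + row.getD j 0))
        cur (List.range (mat.getD 0 []).length))
      (fun i => (List.range (mat.getD 0 []).length).map (fun j => pvRowP mat i (j + 1)))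
      (fun i => (List.range (mat.getD 0 []).length).map (fun j => pvV mat i j))
      mat.length
      (by
        intro t i hi h1i
        rw [pv_foldl_rowlocal2 (List.range (mat.getD 0 []).length)
          (fun prev row j => row.set j (prev.getD j 0 + row.getD j 0)) t i (i - 1) hi
          (by omega)])
      (by
        apply List.map_congr_left
        intro j _
        simp [pvV, pvP])
      (by
        intro i
        beta_reduce
        rw [pv_fill (fun j x => ((List.range (mat.getD 0 []).length).map
              (fun j => pvV mat i j)).getD j 0 + x)
            (fun j => pvRowP mat (i + 1) (j + 1)) (mat.getD 0 []).length
            (mat.getD 0 []).length le_rfl]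
        apply List.map_congr_left
        intro j hj
        have hjc := List.mem_range.mp hj
        rw [if_pos hjc, PySem.List.getD_map_range _ _ _ _ hjc]
        simp [pvV, pvP, Finset.sum_range_succ])
      (mat.length - 1) (by omega)]
    apply List.map_congr_left
    intro r hr
    rw [if_pos (by have := List.mem_range.mp hr; omega)]
  rw [htemp2, htemp0]
  simp only [pv_cellRead_def]
  rw [pv_fold_fresh _
    (fun i row => List.foldl (fun row j => row.set j (pvCellRead mat k i j)) row
      (List.range (mat.getD 0 []).length))
    (List.replicate (mat.getD 0 []).length 0) mat.length
    (by
      intro t i hi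
      rw [pv_foldl_rowlocal (List.range (mat.getD 0 []).length)
        (fun row j => row.set j (pvCellRead mat k i j)) t i hi])
    mat.length le_rfl]
  apply List.map_congr_left
  intro i hi
  rw [if_pos (List.mem_range.mp hi)]
  have hrepl : List.replicate (mat.getD 0 []).length (0:Int)
      = (List.range (mat.getD 0 []).length).map (fun _ => (0:Int)) := by
    rw [List.map_const']; rw [List.length_range]
  rw [hrepl]
  rw [pv_fill (fun j _ => pvCellRead mat k i j) (fun _ => (0:Int)) (mat.getD 0 []).length
    (mat.getD 0 []).length le_rfl]
  apply List.map_congr_left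
  intro j hj
  rw [if_pos (List.mem_range.mp hj)]
  exact pv_cellRead_eq_Acell mat k i j (List.mem_range.mp hi) (List.mem_range.mp hj) hk hrows hcols

lemma pv_P_zero (mat : List (List Int)) (X : Nat) : pvP mat X 0 = 0 := by
  simp [pvP, pvRowP]

-- B's double loop over the clamped window, as a four-corner prefix-sum combination
lemma pv_sum_window (mat : List (List Int)) (lr rr lc rc : Int)
    (h0r : 0 ≤ lr) (hlr : lr ≤ rr + 1) (h0c : 0 ≤ lc) (hlc : lc ≤ rc + 1) :
    (PySem.List.pyRange lr (rr + 1) 1).foldl (fun s r =>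
      (PySem.List.pyRange lc (rc + 1) 1).foldl
        (fun s c => s + (mat.getD r.toNat []).getD c.toNat 0) s) 0
    = pvP mat (rr + 1).toNat (rc + 1).toNat - pvP mat (rr + 1).toNat lc.toNat
      - pvP mat lr.toNat (rc + 1).toNat + pvP mat lr.toNat lc.toNat := by
  simp only [show ∀ (r c : Int), (mat.getD r.toNat []).getD c.toNat 0
    = pvGet2 mat r.toNat c.toNat from fun _ _ => rfl]
  simp only [PySem.List.foldl_add, zero_add]
  rw [PySem.List.pyRange_one lr (rr + 1), PySem.List.pyRange_one lc (rc + 1)]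
  simp only [List.map_map, Function.comp_def]
  rw [pv_sum_map_range]
  have hsum : ∀ t : Nat, ((List.range ((rc + 1 - lc).toNat)).map
      (fun (u : Nat) => pvGet2 mat (lr + (t : Int)).toNat (lc + (u : Int)).toNat)).sum
      = ∑ c ∈ Finset.Ico lc.toNat (rc + 1).toNat, pvGet2 mat (lr.toNat + t) c := by
    intro t
    rw [pv_sum_map_range, Finset.sum_Ico_eq_sum_range]
    have hn : (rc + 1).toNat - lc.toNat = (rc + 1 - lc).toNat := by omega
    rw [← hn]
    apply Finset.sum_congr rfl
    intro u _
    congr 1 <;> omega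
  simp only [hsum]
  have hnr : (rr + 1 - lr).toNat = (rr + 1).toNat - lr.toNat := by omega
  rw [hnr, ← Finset.sum_Ico_eq_sum_range
    (fun r => ∑ c ∈ Finset.Ico lc.toNat (rc + 1).toNat, pvGet2 mat r c)
    lr.toNat ((rr + 1).toNat)]
  have hico : ∀ r : Nat, ∑ c ∈ Finset.Ico lc.toNat (rc + 1).toNat, pvGet2 mat r c
      = pvRowP mat r ((rc + 1).toNat) - pvRowP mat r lc.toNat := by
    intro r; rw [Finset.sum_Ico_eq_sub _ (by omega)]; rfl
  simp only [hico]
  rw [Finset.sum_sub_distrib, Finset.sum_Ico_eq_sub _ (by omega : lr.toNat ≤ (rr + 1).toNat),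
    Finset.sum_Ico_eq_sub _ (by omega : lr.toNat ≤ (rr + 1).toNat)]
  simp only [pvP]
  ring

-- the core per-cell identity: A's inclusion-exclusion equals B's window sum
lemma pv_cell_final (mat : List (List Int)) (k : Int) (i j : Nat)
    (hi : i < mat.length) (hj : j < (mat.getD 0 []).length) (hk : 0 ≤ k)
    (hrows : 0 < mat.length) (hcols : 0 < (mat.getD 0 []).length) :
    pvAcell mat k i j
      = (PySem.List.pyRange (max ((i : Int) - k) 0)
            (min ((i : Int) + k) ((mat.length : Int) - 1) + 1) 1).foldl (fun s r =>
          (PySem.List.pyRange (max ((j : Int) - k) 0)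
              (min ((j : Int) + k) (((mat.getD 0 []).length : Int) - 1) + 1) 1).foldl
            (fun s c => s + (mat.getD r.toNat []).getD c.toNat 0) s) 0 := by
  rw [pv_sum_window mat _ _ _ _ (le_max_right _ _) (by omega) (le_max_right _ _) (by omega)]
  simp only [pvAcell, pvV]
  have hlr : (if (i : Int) - k ≥ 0 then (i : Int) - k else 0) = max ((i : Int) - k) 0 := by omega
  have hlc : (if (j : Int) - k ≥ 0 then (j : Int) - k else 0) = max ((j : Int) - k) 0 := by omega
  have hrr : (if (i : Int) + k < (mat.length : Int) then (i : Int) + k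
      else (mat.length : Int) - 1) = min ((i : Int) + k) ((mat.length : Int) - 1) := by omega
  have hrc : (if (j : Int) + k < ((mat.getD 0 []).length : Int) then (j : Int) + k
      else ((mat.getD 0 []).length : Int) - 1)
      = min ((j : Int) + k) (((mat.getD 0 []).length : Int) - 1) := by omega
  rw [hlr, hlc, hrr, hrc]
  have hmain : pvP mat ((min ((i : Int) + k) ((mat.length : Int) - 1)).toNat + 1)
        ((min ((j : Int) + k) (((mat.getD 0 []).length : Int) - 1)).toNat + 1)
      = pvP mat (min ((i : Int) + k) ((mat.length : Int) - 1) + 1).toNat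
        (min ((j : Int) + k) (((mat.getD 0 []).length : Int) - 1) + 1).toNat := by
    congr 1 <;> omega
  have ha1 : (if max ((j : Int) - k) 0 - 1 ≥ 0 then
        pvP mat ((min ((i : Int) + k) ((mat.length : Int) - 1)).toNat + 1)
          ((max ((j : Int) - k) 0 - 1).toNat + 1) else 0)
      = pvP mat (min ((i : Int) + k) ((mat.length : Int) - 1) + 1).toNat
          (max ((j : Int) - k) 0).toNat := by
    split_ifs with h
    · congr 1 <;> omega
    · rw [(by omega : (max ((j : Int) - k) 0).toNat = 0), pv_P_zero]
  have ha2 : (if max ((i : Int) - k) 0 - 1 ≥ 0 then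
        pvP mat ((max ((i : Int) - k) 0 - 1).toNat + 1)
          ((min ((j : Int) + k) (((mat.getD 0 []).length : Int) - 1)).toNat + 1) else 0)
      = pvP mat (max ((i : Int) - k) 0).toNat
          (min ((j : Int) + k) (((mat.getD 0 []).length : Int) - 1) + 1).toNat := by
    split_ifs with h
    · congr 1 <;> omega
    · rw [(by omega : (max ((i : Int) - k) 0).toNat = 0)]
      simp [pvP]
  have ha3 : (if (max ((i : Int) - k) 0 - 1 ≥ 0 ∧ max ((j : Int) - k) 0 - 1 ≥ 0) then
        pvP mat ((max ((i : Int) - k) 0 - 1).toNat + 1) ((max ((j : Int) - k) 0 - 1).toNat + 1)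
      else 0)
      = pvP mat (max ((i : Int) - k) 0).toNat (max ((j : Int) - k) 0).toNat := by
    split_ifs with h
    · congr 1 <;> omega
    · rw [Classical.not_and_iff_not_or_not] at h
      rcases h with h | h
      · rw [(by omega : (max ((i : Int) - k) 0).toNat = 0)]
        simp [pvP]
      · rw [(by omega : (max ((j : Int) - k) 0).toNat = 0), pv_P_zero]
  rw [hmain, ha1, ha2, ha3]

-- ===== VERDICT (by name: the statement is the Claim_ definition above) =====
theorem k_neighborhood_sum_spec : Claim_equal_k_neighborhood_sum := by
  unfold Claim_equal_k_neighborhood_sum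
  intro mat k _hdom hpre
  unfold Spec_k_neighborhood_sum
  by_cases hg : mat = [] ∨ mat.getD 0 [] = []
  · unfold k_neighborhood_sum k_neighborhood_sum_alt
    rw [if_pos hg, if_pos hg]
  · have hk : 0 ≤ k := by
      rcases hpre with h | h
      · exact absurd h hg
      · exact h.1
    have hg1 : ¬ mat = [] := fun h => hg (Or.inl h)
    have hg2 : ¬ mat.getD 0 [] = [] := fun h => hg (Or.inr h)
    have hrows : 0 < mat.length := List.length_pos_iff.mpr hg1
    have hcols : 0 < (mat.getD 0 []).length := List.length_pos_iff.mpr hg2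
    rw [pv_A_char mat k hg1 hg2 hk]
    unfold k_neighborhood_sum_alt
    rw [if_neg hg]
    apply List.map_congr_left
    intro i hi
    apply List.map_congr_left
    intro j hj
    exact pv_cell_final mat k i j (List.mem_range.mp hi) (List.mem_range.mp hj) hk hrows hcols
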